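-- pv_equiv track=rewrite | github.com/apexneuralecosystems/AI-Resume-Builder | backend/app/services/section_integrity.py | _dedupe_supplements
-- ===== SOURCE A (Python) =====
-- from collections import OrderedDict, defaultdict
--
-- def _dedupe_supplements(items: list[dict[str, str]]) -> list[dict[str, str]]:
--     merged: OrderedDict[str, str] = OrderedDict()
--     for raw in items:
--         title = (raw.get("title") or "").strip()
--         body = (raw.get("body") or "").strip()
--         if not title:
--             continue
--         if title not in merged or len(body) > len(merged[title]):
--             merged[title] = body
--     return [{"title": t, "body": b} for t, b in merged.items()]
-- ===== SOURCE B (Python) =====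
-- def _clean(raw):
--     return ((raw.get("title") or "").strip(), (raw.get("body") or "").strip())
--
--
-- def _dedupe_supplements(items: list[dict[str, str]]) -> list[dict[str, str]]:
--     # Staged pipeline: clean+filter once, dedupe titles in first-seen order,
--     # then for each title pick the longest body over the cleaned list
--     # (max with key=len keeps the earliest on ties, like A's running update).
--     cleaned = [p for p in map(_clean, items) if p[0]]
--     titles = list(dict.fromkeys(t for t, _ in cleaned))
--     return [{"title": t, "body": max((b for t2, b in cleaned if t2 == t), key=len)}
--             for t in titles]
-- ===== Notes on version B (the rewrite author's own statement) =====
-- stated objective: alternative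
-- what changed: Replaces A's single running-max dict loop with a staged dict-free pipeline: clean-and-filter the items, dedupe titles in first-seen order via dict.fromkeys, then for each distinct title scan the cleaned list and take max(key=len) of its bodies (first maximal, matching A's earliest-longest tie-break).
import Mathlib
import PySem

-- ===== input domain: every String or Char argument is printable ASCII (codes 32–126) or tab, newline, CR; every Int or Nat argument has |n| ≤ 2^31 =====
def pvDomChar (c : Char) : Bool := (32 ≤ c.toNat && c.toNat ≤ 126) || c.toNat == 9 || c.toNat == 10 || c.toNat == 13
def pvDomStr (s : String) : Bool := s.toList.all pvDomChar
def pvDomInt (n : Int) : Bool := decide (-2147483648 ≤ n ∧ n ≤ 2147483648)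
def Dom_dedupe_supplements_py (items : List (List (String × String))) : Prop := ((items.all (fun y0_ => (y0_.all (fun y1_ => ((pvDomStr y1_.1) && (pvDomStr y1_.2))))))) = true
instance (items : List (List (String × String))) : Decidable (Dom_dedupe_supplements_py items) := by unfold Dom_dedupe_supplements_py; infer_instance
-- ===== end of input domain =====

-- B replaces A's running-max dict loop with a dict-free staged pipeline: clean+filter,
-- dedupe titles in first-seen order, then per-title longest-body scan (objective: alternative).


-- ===== PORT A =====
def dedupe_supplements_py (items : List (List (String × String))) : List (List (String × String)) :=
  let merged : PySem.Dict String String :=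
    items.foldl (fun merged raw =>
      let title := PySem.Str.strip ((PySem.Dict.mk raw).getD "title" "")
      let body := PySem.Str.strip ((PySem.Dict.mk raw).getD "body" "")
      if title = "" then merged
      else
        match merged.get? title with
        | none => merged.insert title body
        | some old =>
            if PySem.Str.len body > PySem.Str.len old then merged.insert title body else merged)
      PySem.Dict.empty
  merged.items.map (fun p => [("title", p.1), ("body", p.2)])

-- ===== PORT B =====
/-- B's `_clean` helper: the (stripped title, stripped body) pair of one raw item. -/
def pvClean (raw : List (String × String)) : String × String :=
  (PySem.Str.strip ((PySem.Dict.mk raw).getD "title" ""),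
   PySem.Str.strip ((PySem.Dict.mk raw).getD "body" ""))

def dedupe_supplements_py_alt (items : List (List (String × String))) : List (List (String × String)) :=
  let cleaned := (items.map pvClean).filter (fun p => !(p.1 == ""))
  -- list(dict.fromkeys(..)) = first occurrences in order = PySem.List.dedup
  let titles := PySem.List.dedup (cleaned.map (·.1))
  titles.map (fun t =>
    [("title", t),
     ("body", PySem.List.maxD ((cleaned.filter (fun p => p.1 == t)).map (·.2)) PySem.Str.len "")])

-- ===== PRECONDITION & SPEC =====
def Spec_dedupe_supplements_py (items : List (List (String × String))) (out : List (List (String × String))) : Prop := out = dedupe_supplements_py_alt items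
instance (items : List (List (String × String))) (out : List (List (String × String))) : Decidable (Spec_dedupe_supplements_py items out) := by unfold Spec_dedupe_supplements_py; infer_instance

-- ===== CLAIM (what is proved, stated in full; the proofs are below) =====
def Claim_equal_dedupe_supplements_py : Prop := ∀ (items : List (List (String × String))), Dom_dedupe_supplements_py items → Spec_dedupe_supplements_py items (dedupe_supplements_py items)

-- ===== LEMMAS AND PROOFS =====

/-- Cleaned pairs with nonempty titles, in input order (B's `cleaned`). -/
def pvL (items : List (List (String × String))) : List (String × String) :=
  (items.map pvClean).filter (fun p => !(p.1 == ""))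

/-- A's loop body on a cleaned pair. -/
def pvAStep (d : PySem.Dict String String) (p : String × String) : PySem.Dict String String :=
  match d.get? p.1 with
  | none => d.insert p.1 p.2
  | some old => if PySem.Str.len p.2 > PySem.Str.len old then d.insert p.1 p.2 else d

/-- One step of Python's `max(…, key=len)` fold (replace only on strictly longer). -/
def pvStepMax (o : Option String) (x : String) : Option String :=
  match o with
  | none => some x
  | some m => if PySem.Str.len m < PySem.Str.len x then some x else some m

/-- Skipping the empty-title items of A's fold is folding over the filtered cleaned list. -/
theorem pvFoldSkip {σ : Type} (g : σ → String × String → σ) :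
    ∀ (l : List (List (String × String))) (d : σ),
      l.foldl (fun d raw => if (pvClean raw).1 = "" then d else g d (pvClean raw)) d
        = ((l.map pvClean).filter (fun p => !(p.1 == ""))).foldl g d := by
  intro l
  induction l with
  | nil => intro d; rfl
  | cons r t ih =>
      intro d
      simp only [List.foldl_cons, List.map_cons, List.filter_cons]
      by_cases h : (pvClean r).1 = "" <;> simp [h, ih]

theorem pvAfold (items : List (List (String × String))) :
    dedupe_supplements_py items
      = ((pvL items).foldl pvAStep PySem.Dict.empty).items.map
          (fun p => [("title", p.1), ("body", p.2)]) := by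
  unfold dedupe_supplements_py pvL
  rw [← pvFoldSkip pvAStep]
  rfl

theorem pvAStep_keys (d : PySem.Dict String String) (p : String × String) :
    (pvAStep d p).keys = PySem.Set.add d.keys p.1 := by
  unfold pvAStep PySem.Set.add
  rcases h : d.get? p.1 with _ | old
  · have hc : d.contains p.1 = false := (PySem.Dict.get?_eq_none_iff_contains d p.1).mp h
    have hk : PySem.Set.contains d.keys p.1 = false := by
      rw [PySem.Dict.contains_eq_decide_mem_keys] at hc
      simpa [PySem.Set.contains] using hc
    rw [hk]
    simp [PySem.Dict.keys_insert_of_not_contains d p.2 hc]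
  · have hc : d.contains p.1 = true := by
      rw [PySem.Dict.contains_eq_isSome_get?, h]; rfl
    have hk : PySem.Set.contains d.keys p.1 = true := by
      rw [PySem.Dict.contains_eq_decide_mem_keys] at hc
      simpa [PySem.Set.contains] using hc
    rw [hk]
    dsimp only
    split_ifs with hlen <;>
      simp_all [PySem.Dict.keys_insert_of_contains d p.2 hc]

theorem pvAkeys : ∀ (L : List (String × String)) (d : PySem.Dict String String),
    (L.foldl pvAStep d).keys = PySem.Set.update d.keys (L.map (·.1)) := by
  intro L
  induction L with
  | nil => intro d; rfl
  | cons p t ih =>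
      intro d
      simp only [List.foldl_cons, List.map_cons, ih, PySem.Set.update, List.foldl_cons,
        pvAStep_keys]

theorem pvAnodup : ∀ (L : List (String × String)) (d : PySem.Dict String String),
    d.keys.Nodup → (L.foldl pvAStep d).keys.Nodup := by
  intro L
  induction L with
  | nil => intro d h; exact h
  | cons p t ih =>
      intro d h
      refine ih _ ?_
      unfold pvAStep
      rcases d.get? p.1 with _ | old
      · exact PySem.Dict.nodup_keys_insert d p.1 p.2 h
      · dsimp only
        split_ifs
        · exact PySem.Dict.nodup_keys_insert d p.1 p.2 h
        · exact h

theorem pvAget : ∀ (L : List (String × String)) (d : PySem.Dict String String) (t : String),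
    (L.foldl pvAStep d).get? t
      = ((L.filter (fun p => p.1 == t)).map (·.2)).foldl pvStepMax (d.get? t) := by
  intro L
  induction L with
  | nil => intro d t; rfl
  | cons p tl ih =>
      intro d t
      simp only [List.foldl_cons, List.filter_cons]
      by_cases hpt : p.1 = t
      · subst hpt
        have hstep : (pvAStep d p).get? p.1 = pvStepMax (d.get? p.1) p.2 := by
          unfold pvAStep pvStepMax
          rcases h : d.get? p.1 with _ | old
          · simp [PySem.Dict.get?_insert_self]
          · dsimp only
            split_ifs with hlen
            · simp [PySem.Dict.get?_insert_self]
            · rw [h]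
        simp [ih, hstep]
      · have hstep : (pvAStep d p).get? t = d.get? t := by
          unfold pvAStep
          rcases d.get? p.1 with _ | old
          · exact PySem.Dict.get?_insert_of_ne d p.2 (fun h => hpt h.symm)
          · dsimp only
            split_ifs
            · exact PySem.Dict.get?_insert_of_ne d p.2 (fun h => hpt h.symm)
            · rfl
        simp [ih, hstep, hpt]

theorem pvAget_max (items : List (List (String × String))) (t : String) :
    ((pvL items).foldl pvAStep PySem.Dict.empty).get? t
      = PySem.List.max? (((pvL items).filter (fun p => p.1 == t)).map (·.2)) PySem.Str.len := by
  rw [pvAget, PySem.Dict.get?_empty]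
  unfold PySem.List.max?
  congr 1
  funext o x
  cases o <;> rfl

-- ===== VERDICT (by name: the statement is the Claim_ definition above) =====
theorem dedupe_supplements_py_spec : Claim_equal_dedupe_supplements_py := by
  intro items _
  unfold Spec_dedupe_supplements_py
  rw [pvAfold]
  have hAn : ((pvL items).foldl pvAStep PySem.Dict.empty).keys.Nodup :=
    pvAnodup _ _ (by simp)
  have hAk : ((pvL items).foldl pvAStep PySem.Dict.empty).keys
      = PySem.Set.ofList ((pvL items).map (·.1)) := by
    rw [pvAkeys, PySem.Set.ofList_eq_foldl]; rfl
  rw [PySem.Dict.items_eq_map_keys _ hAn "", List.map_map, hAk]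
  show _ = dedupe_supplements_py_alt items
  have hB : dedupe_supplements_py_alt items
      = (PySem.List.dedup ((pvL items).map (·.1))).map (fun t =>
          [("title", t),
           ("body", PySem.List.maxD (((pvL items).filter (fun p => p.1 == t)).map (·.2))
              PySem.Str.len "")]) := rfl
  rw [hB]
  simp only [PySem.List.dedup_eq_ofList]
  apply List.map_congr_left
  intro k _
  have hA : ((pvL items).foldl pvAStep PySem.Dict.empty).getD k ""
      = PySem.List.maxD (((pvL items).filter (fun p => p.1 == k)).map (·.2)) PySem.Str.len "" := by
    rw [PySem.Dict.getD_eq_get?_getD, pvAget_max]; rfl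
  simp [Function.comp, hA]
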